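-- pv_equiv track=rewrite | github.com/Yash-lalchandaani/vjudge | Week3/D - Fair Numbers.py | is_fair
-- ===== SOURCE A (Python) =====
-- def is_fair(num):
--     original_num = num
--     while num > 0:
--         digit = num % 10
--         if digit != 0 and original_num % digit != 0:
--             return False
--         num //= 10
--     return True
-- ===== SOURCE B (Python) =====
-- def _gcd(a, b):
--     while b > 0:
--         a, b = b, a % b
--     return a
--
-- def is_fair(num):
--     l = 1
--     n = num
--     while n > 0:
--         d = n % 10
--         if d != 0:
--             l = l * d // _gcd(l, d)
--         n //= 10
--     return num % l == 0
-- ===== Notes on version B (the rewrite author's own statement) =====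
-- stated objective: alternative
-- what changed: B folds the nonzero digits into a running least common multiple and performs a single final divisibility test of num by that lcm, instead of A's per-digit divisibility test with early return.
import Mathlib
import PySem

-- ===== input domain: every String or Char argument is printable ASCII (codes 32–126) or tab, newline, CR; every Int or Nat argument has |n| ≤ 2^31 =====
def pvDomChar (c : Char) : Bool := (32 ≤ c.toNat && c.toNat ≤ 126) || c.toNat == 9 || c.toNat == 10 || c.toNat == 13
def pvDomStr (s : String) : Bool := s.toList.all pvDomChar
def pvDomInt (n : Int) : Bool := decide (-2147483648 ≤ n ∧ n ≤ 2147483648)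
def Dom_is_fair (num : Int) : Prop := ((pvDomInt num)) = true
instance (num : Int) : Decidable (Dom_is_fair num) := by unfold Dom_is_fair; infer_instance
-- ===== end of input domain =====

-- B folds the nonzero digits into a running LCM and makes one final divisibility test,
-- instead of A's per-digit divisibility test with early return (alternative decomposition, same cost).


-- termination helper for the digit loops (cited by name in decreasing_by)
theorem ediv10_bounds (n : Int) (hn : 0 < n) : n / 10 < n ∧ 0 ≤ n / 10 := by
  have h := Int.mul_ediv_add_emod n 10
  have h1 := Int.emod_nonneg n (by norm_num : (10:Int) ≠ 0)
  have h2 := Int.emod_lt_of_pos n (by norm_num : (0:Int) < 10)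
  have h3 : 0 ≤ n / 10 := Int.ediv_nonneg (by omega) (by norm_num)
  omega

-- ===== PORT A =====
-- 'while num > 0: digit = num % 10; if digit != 0 and original_num % digit != 0: return False; num //= 10'
def isFairLoop (originalNum num : Int) : Bool :=
  if h : num > 0 then
    let digit := PySem.Int.mod num 10
    if digit ≠ 0 ∧ PySem.Int.mod originalNum digit ≠ 0 then false
    else isFairLoop originalNum (PySem.Int.floordiv num 10)
  else true
termination_by num.toNat
decreasing_by
  have h1 : PySem.Int.floordiv num 10 = num / 10 := PySem.Int.floordiv_eq_ediv_of_pos (by omega)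
  have h2 := ediv10_bounds num (by omega)
  omega

def is_fair (num : Int) : Bool := isFairLoop num num

-- ===== PORT B =====
-- 'def _gcd(a, b): while b > 0: a, b = b, a % b; return a'
def gcdLoop (a b : Int) : Int :=
  if h : b > 0 then gcdLoop b (PySem.Int.mod a b) else a
termination_by b.toNat
decreasing_by
  have h1 := PySem.Int.mod_nonneg a h
  have h2 := PySem.Int.mod_lt a h
  omega

-- 'while n > 0: d = n % 10; if d != 0: l = l * d // _gcd(l, d); n //= 10'
def lcmLoop (n l : Int) : Int :=
  if h : n > 0 then
    let d := PySem.Int.mod n 10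
    lcmLoop (PySem.Int.floordiv n 10)
      (if d ≠ 0 then PySem.Int.floordiv (l * d) (gcdLoop l d) else l)
  else l
termination_by n.toNat
decreasing_by
  have h1 : PySem.Int.floordiv n 10 = n / 10 := PySem.Int.floordiv_eq_ediv_of_pos (by omega)
  have h2 := ediv10_bounds n (by omega)
  omega

def is_fair_alt (num : Int) : Bool :=
  decide (PySem.Int.mod num (lcmLoop num 1) = 0)

-- ===== PRECONDITION & SPEC =====
def Spec_is_fair (num : Int) (out : Bool) : Prop := out = is_fair_alt num
instance (num : Int) (out : Bool) : Decidable (Spec_is_fair num out) := by unfold Spec_is_fair; infer_instance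

-- ===== CLAIM (what is proved, stated in full; the proofs are below) =====
def Claim_equal_is_fair : Prop := ∀ (num : Int), Dom_is_fair num → Spec_is_fair num (is_fair num)

-- ===== LEMMAS AND PROOFS =====

-- gcdLoop computes Nat.gcd on nonnegative inputs
theorem gcdLoop_natCast (b a : Nat) : gcdLoop (a : Int) (b : Int) = (Nat.gcd a b : Int) := by
  induction b using Nat.strong_induction_on generalizing a with
  | _ b ih =>
    cases b with
    | zero => rw [gcdLoop]; simp
    | succ b' =>
      have hb : (0:Int) < (b' + 1 : Nat) := by exact_mod_cast Nat.succ_pos b'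
      rw [gcdLoop]
      simp only [hb, dif_pos]
      have hm : PySem.Int.mod (a : Int) ((b' + 1 : Nat) : Int) = ((a % (b' + 1) : Nat) : Int) := by
        rw [PySem.Int.mod_eq_emod_of_pos hb]; push_cast; rfl
      rw [hm, ih (a % (b' + 1)) (Nat.mod_lt _ (Nat.succ_pos b'))]
      congr 1
      rw [Nat.gcd_comm (b' + 1), ← Nat.gcd_rec, Nat.gcd_comm]

theorem gcdLoop_eq_gcd (l d : Int) (hl : 0 ≤ l) (hd : 0 ≤ d) :
    gcdLoop l d = (Int.gcd l d : Int) := by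
  have h1 : l = ((l.toNat : Nat) : Int) := by omega
  have h2 : d = ((d.toNat : Nat) : Int) := by omega
  rw [h1, h2, gcdLoop_natCast]
  simp [Int.gcd_def]
  congr 1 <;> omega

-- the lcm step: l * d // gcd(l, d) is the least common multiple, as a cast of Int.lcm
theorem lcm_step (l d : Int) (hl : 0 < l) (hd : 0 < d) :
    PySem.Int.floordiv (l * d) (gcdLoop l d) = (Int.lcm l d : Int) := by
  rw [gcdLoop_eq_gcd l d (le_of_lt hl) (le_of_lt hd)]
  have hg : 0 < Int.gcd l d := Int.gcd_pos_of_ne_zero_left d (by omega)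
  have hg' : (0:Int) < (Int.gcd l d : Int) := by exact_mod_cast hg
  rw [PySem.Int.floordiv_eq_ediv_of_pos hg']
  have hml : (Int.gcd l d : Int) * (Int.lcm l d : Int) = l * d := by
    have := Int.gcd_mul_lcm l d
    have h1 : l.natAbs = l.toNat := by omega
    have h2 : d.natAbs = d.toNat := by omega
    have : ((Int.gcd l d * Int.lcm l d : Nat) : Int) = ((l.natAbs * d.natAbs : Nat) : Int) := by
      exact_mod_cast congrArg (Nat.cast : Nat → Int) this
    push_cast at this
    rw [this, abs_of_pos hl, abs_of_pos hd]
  rw [← hml, Int.mul_ediv_cancel_left _ (by omega)]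

theorem lcm_cast_pos (l d : Int) (hl : 0 < l) (hd : 0 < d) : (0:Int) < (Int.lcm l d : Int) := by
  have hg : 0 < Int.gcd l d := Int.gcd_pos_of_ne_zero_left d (by omega)
  have hml := Int.gcd_mul_lcm l d
  have : 0 < Int.gcd l d * Int.lcm l d := by
    rw [hml]; positivity
  have : 0 < Int.lcm l d := Nat.pos_of_mul_pos_left (by rwa [Nat.mul_comm] at this)
  exact_mod_cast this

theorem lcm_dvd_iff_int (l d x : Int) : ((Int.lcm l d : Int) ∣ x ↔ l ∣ x ∧ d ∣ x) := by
  rw [Int.coe_lcm]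
  exact ⟨fun h => ⟨dvd_trans (dvd_lcm_left l d) h, dvd_trans (dvd_lcm_right l d) h⟩,
    fun ⟨h1, h2⟩ => lcm_dvd h1 h2⟩

-- digit bounds for n > 0
theorem digit_bounds (n : Int) (hn : 0 < n) :
    0 ≤ PySem.Int.mod n 10 ∧ PySem.Int.mod n 10 < 10 :=
  ⟨PySem.Int.mod_nonneg n (by omega), PySem.Int.mod_lt n (by omega)⟩

-- MAIN INVARIANT: the aggregate lcm test equals A's early-return scan conjoined with the carried test
theorem main_aux (orig : Int) : ∀ (k : Nat) (n l : Int), n.toNat ≤ k → 0 < l →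
    decide (PySem.Int.mod orig (lcmLoop n l) = 0)
      = (isFairLoop orig n && decide (PySem.Int.mod orig l = 0)) := by
  intro k
  induction k with
  | zero =>
    intro n l hk hl
    have hn : ¬ n > 0 := by omega
    rw [lcmLoop, isFairLoop]
    simp [hn]
  | succ k ih =>
    intro n l hk hl
    by_cases hn : n > 0
    · have hfd : PySem.Int.floordiv n 10 = n / 10 := PySem.Int.floordiv_eq_ediv_of_pos (by omega)
      obtain ⟨hlt, hge⟩ := ediv10_bounds n (by omega)
      have ihn : ∀ l : Int, 0 < l →
          decide (PySem.Int.mod orig (lcmLoop (n / 10) l) = 0)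
            = (isFairLoop orig (n / 10) && decide (PySem.Int.mod orig l = 0)) :=
        fun l hl => ih (n / 10) l (by omega) hl
      rw [lcmLoop, isFairLoop]
      simp only [hn, dif_pos, hfd]
      set d := PySem.Int.mod n 10 with hdd
      obtain ⟨hd0, hd10⟩ := digit_bounds n hn
      by_cases hd : d ≠ 0
      · rw [if_pos hd]
        have hdpos : 0 < d := by omega
        rw [lcm_step l d hl hdpos]
        rw [ihn _ (lcm_cast_pos l d hl hdpos)]
        have hmodsplit : decide (PySem.Int.mod orig ((Int.lcm l d : Nat) : Int) = 0)
            = (decide (PySem.Int.mod orig l = 0) && decide (PySem.Int.mod orig d = 0)) := by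
          simp only [PySem.Int.mod_eq_zero_iff_dvd]
          simp [lcm_dvd_iff_int l d orig, Bool.decide_and]
        by_cases horig : PySem.Int.mod orig d ≠ 0
        · rw [if_pos ⟨hd, horig⟩, hmodsplit]
          simp [horig]
        · push_neg at horig
          have hA : ¬ (d ≠ 0 ∧ PySem.Int.mod orig d ≠ 0) := by simp [horig]
          rw [if_neg hA, hmodsplit]
          simp [horig, Bool.and_comm]
      · rw [if_neg hd]
        push_neg at hd
        have hA : ¬ (d ≠ 0 ∧ PySem.Int.mod orig d ≠ 0) := by simp [hd]
        rw [if_neg hA]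
        exact ihn l hl
    · rw [lcmLoop, isFairLoop]
      simp [hn]

-- ===== VERDICT (by name: the statement is the Claim_ definition above) =====
theorem is_fair_spec : Claim_equal_is_fair := by
  intro num _
  unfold Spec_is_fair is_fair is_fair_alt
  rw [main_aux num num.toNat num 1 (le_refl _) one_pos]
  have h1 : PySem.Int.mod num 1 = 0 := (PySem.Int.mod_eq_zero_iff_dvd num 1).mpr (one_dvd num)
  simp
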